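-- pv_equiv track=rewrite | github.com/idangab/AES | main.py | math_2
-- ===== SOURCE A (Python) =====
-- def math_2(file):  # handles multiplication by 2 (x)
--     zero_to_one = {"0": '1', '1': '0'}
--     bin_format = bin(file)
--     bin_add = bin(file)
--     bin_final = bin(int(bin_format, 2) + int(bin_add, 2))
--     has_8 = False
--     if len(bin_final) == 11:  # checking that the length is good to go
--         has_8 = True
--         bin_final = bin_final[0:2] + bin_final[3::]
--     if has_8:
--         bin_end = ''
--         for i in range(len(bin_final)):
--             if i == 5 or i == 6 or i == 8 or i == 9:
--                 bin_end += zero_to_one[bin_final[i]]  # switching the bit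
--             else:
--                 bin_end += bin_final[i]
--     else:
--         bin_end = bin_final
--     return bin_end  # returns the result of multiplying by 2
-- ===== SOURCE B (Python) =====
-- def math_2(file):  # AES xtime: multiply the byte by 2 in GF(2^8), returned as a binary string
--     if 128 <= file <= 255:
--         return '0b' + format(((2 * file) & 0xFF) ^ 0x1B, '08b')
--     return bin(2 * file)
-- ===== Notes on version B (the rewrite author's own statement) =====
-- stated objective: simpler
-- what changed: Replaced A's string surgery (parse bin string back to int, slice out the top bit, flip four characters via a dict in a per-character loop) by integer bit operations: one XOR with 0x1B and direct '08b' formatting in the high-byte branch, plain bin(2*file) otherwise.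
-- intended difference: On file in [-127,-64] A's length-11 branch mangles the negative binary string (it deletes the 'b' of the '-0b' prefix and flips bits of a sign-magnitude string), e.g. A(-64) = '-010011011'; B returns bin(2*file) = '-0b10000000', the correct doubling. — e.g. on math_2(-64): A returns "-010011011", B returns "-0b10000000"
import Mathlib
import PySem

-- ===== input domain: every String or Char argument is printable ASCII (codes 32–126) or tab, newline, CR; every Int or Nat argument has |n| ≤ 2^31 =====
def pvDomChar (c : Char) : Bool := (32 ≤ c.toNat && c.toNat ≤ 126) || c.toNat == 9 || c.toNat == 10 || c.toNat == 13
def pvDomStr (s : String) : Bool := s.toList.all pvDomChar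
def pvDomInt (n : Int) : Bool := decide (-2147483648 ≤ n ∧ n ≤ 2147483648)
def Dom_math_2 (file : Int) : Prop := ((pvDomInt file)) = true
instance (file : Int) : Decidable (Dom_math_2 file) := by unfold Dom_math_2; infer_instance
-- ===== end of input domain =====

-- B replaces A's binary-string surgery (slice + per-character dict flipping) by one XOR with 0x1B
-- and direct 8-bit formatting; on file ∈ [-127,-64] A mangles the '-0b' prefix and B returns bin(2*file).


-- ===== PORT A =====
-- bin() builtin: binary digits of n, most significant first; the extra fuel argument (called
-- with fuel = n) only makes the n/2-recursion structural — it never changes the result.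
def pvBitsF : Nat → Nat → List Char
  | 0, n => [if n = 1 then '1' else '0']
  | f + 1, n =>
    if n < 2 then [if n = 1 then '1' else '0']
    else pvBitsF f (n / 2) ++ [if n % 2 = 1 then '1' else '0']

-- bin(m): exact ('-' sign for negatives, then '0b', then the digits of |m|)
def pvBin (m : Int) : List Char :=
  if m < 0 then '-' :: '0' :: 'b' :: pvBitsF (-m).toNat (-m).toNat
  else '0' :: 'b' :: pvBitsF m.toNat m.toNat

def pvParseBits (l : List Char) : Int :=
  l.foldl (fun a c => 2 * a + (if c = '1' then 1 else 0)) 0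

-- int(s, 2): exact on the strings A feeds it (outputs of bin(): optional '-', '0b', binary digits)
def pvParseBin (s : List Char) : Int :=
  if s.headD ' ' = '-' then -(pvParseBits (s.drop 3)) else pvParseBits (s.drop 2)

def math_2 (file : Int) : String :=
  let zero_to_one : PySem.Dict Char Char := PySem.Dict.ofList [('0', '1'), ('1', '0')]
  let bin_format := pvBin file
  let bin_add := pvBin file
  let bin_final := pvBin (pvParseBin bin_format + pvParseBin bin_add)
  let has_8 := false
  let (has_8, bin_final) :=
    if bin_final.length = 11 then
      (true, PySem.List.slice bin_final (some 0) (some 2) ++ PySem.List.slice bin_final (some 3) none)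
    else (has_8, bin_final)
  let bin_end : List Char :=
    if has_8 then
      (PySem.List.pyRange 0 (bin_final.length : Int) 1).foldl
        (fun acc i =>
          if i = 5 ∨ i = 6 ∨ i = 8 ∨ i = 9 then
            -- zero_to_one[bin_final[i]]: on this branch bin_final[i] is always '0' or '1', so the
            -- KeyError default ' ' is unreachable
            acc ++ [zero_to_one.getD (PySem.List.pyGetD bin_final i ' ') ' ']
          else acc ++ [PySem.List.pyGetD bin_final i ' '])
        []
    else bin_final
  String.ofList bin_end

-- ===== PORT B =====
-- format(n, '08b'): 8 zero-padded binary digits, exact for 0 ≤ n < 256 (always the case in B)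
def pvFormat8 (n : Int) : List Char :=
  (List.range 8).map (fun i => if n / 2 ^ (7 - i) % 2 = 1 then '1' else '0')

def math_2_alt (file : Int) : String :=
  if 128 ≤ file ∧ file ≤ 255 then
    String.ofList ('0' :: 'b' :: pvFormat8 (Int.xor (Int.land (2 * file) 255) 27))
  else String.ofList (pvBin (2 * file))

-- ===== PRECONDITION & SPEC =====
-- On file in [-127,-64] A's length-11 branch mangles the negative binary string (it deletes the
-- 'b' of the '-0b' prefix and flips bits of a sign-magnitude string), e.g. A(-64) = '-010011011';
-- B returns bin(2*file) = '-0b10000000', the correct doubling.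
def D_math_2 (file : Int) : Prop := -127 ≤ file ∧ file ≤ -64
instance (file : Int) : Decidable (D_math_2 file) := by unfold D_math_2; infer_instance

def Spec_math_2 (file : Int) (out : String) : Prop := ¬ D_math_2 file → out = math_2_alt file
instance (file : Int) (out : String) : Decidable (Spec_math_2 file out) := by
  unfold Spec_math_2; infer_instance

def pvDiffWitness_math_2 : Int := (-64)
def pvDiffWitnessOut_math_2 : String × String := ("-010011011", "-0b10000000")

-- ===== CLAIM (what is proved, stated in full; the proofs are below) =====
def Claim_unchanged_math_2 : Prop := ∀ (file : Int), Dom_math_2 file → Spec_math_2 file (math_2 file)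
def Claim_changed_math_2 : Prop := Dom_math_2 (pvDiffWitness_math_2) ∧ D_math_2 (pvDiffWitness_math_2) ∧ math_2 (pvDiffWitness_math_2) = pvDiffWitnessOut_math_2.1 ∧ math_2_alt (pvDiffWitness_math_2) = pvDiffWitnessOut_math_2.2 ∧ pvDiffWitnessOut_math_2.1 ≠ pvDiffWitnessOut_math_2.2
def Claim_exact_math_2 : Prop := ∀ (file : Int), Dom_math_2 file → D_math_2 file → math_2 file ≠ math_2_alt file

-- ===== LEMMAS AND PROOFS =====

theorem pvParseBits_append (l : List Char) (c : Char) :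
    pvParseBits (l ++ [c]) = 2 * pvParseBits l + (if c = '1' then 1 else 0) := by
  simp [pvParseBits, List.foldl_append]

theorem pvParseBits_bitsF : ∀ (f n : Nat), n ≤ f → pvParseBits (pvBitsF f n) = (n : Int) := by
  intro f
  induction f with
  | zero =>
    intro n hn
    interval_cases n
    decide
  | succ f ih =>
    intro n hn
    by_cases h2 : n < 2
    · rw [pvBitsF, if_pos h2]
      interval_cases n <;> decide
    · rw [pvBitsF, if_neg h2, pvParseBits_append, ih (n / 2) (by omega)]
      have h := Nat.div_add_mod n 2
      rcases Nat.mod_two_eq_zero_or_one n with h1 | h1 <;> simp [h1] <;> omega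

theorem pvParseBin_pvBin (m : Int) : pvParseBin (pvBin m) = m := by
  by_cases h : m < 0
  · have hb : pvBin m = '-' :: '0' :: 'b' :: pvBitsF (-m).toNat (-m).toNat := by
      rw [pvBin, if_pos h]
    rw [hb, pvParseBin]
    simp only [List.headD_cons, List.drop_succ_cons, List.drop_zero, reduceIte]
    rw [pvParseBits_bitsF _ _ le_rfl]
    omega
  · have hb : pvBin m = '0' :: 'b' :: pvBitsF m.toNat m.toNat := by
      rw [pvBin, if_neg h]
    rw [hb, pvParseBin, if_neg (by simp)]
    simp only [List.drop_succ_cons, List.drop_zero]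
    rw [pvParseBits_bitsF _ _ le_rfl]
    omega

theorem pvBitsF_length_pos : ∀ (f n : Nat), 1 ≤ (pvBitsF f n).length := by
  intro f n
  cases f with
  | zero => simp [pvBitsF]
  | succ f =>
    rw [pvBitsF]
    split <;> simp

theorem pvBitsF_length_bounds : ∀ (f n : Nat), n ≤ f → 1 ≤ n →
    2 ^ ((pvBitsF f n).length - 1) ≤ n ∧ n < 2 ^ (pvBitsF f n).length := by
  intro f
  induction f with
  | zero => intro n h1 h2; omega
  | succ f ih =>
    intro n hn h1
    by_cases h2 : n < 2
    · have hn1 : n = 1 := by omega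
      subst hn1
      rw [pvBitsF, if_pos (by omega)]
      simp
    · have hrec := ih (n / 2) (by omega) (by omega)
      have hpos := pvBitsF_length_pos f (n / 2)
      obtain ⟨K, hK⟩ : ∃ K, (pvBitsF f (n / 2)).length = K + 1 :=
        ⟨_, (Nat.succ_pred_eq_of_pos hpos).symm⟩
      have hrec' : 2 ^ K ≤ n / 2 ∧ n / 2 < 2 ^ (K + 1) := by
        rw [hK] at hrec; simpa using hrec
      have hlen : (pvBitsF (f + 1) n).length = K + 2 := by
        rw [pvBitsF, if_neg h2]; simp [hK]
      rw [hlen]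
      have p1 : 2 ^ (K + 2 - 1) = 2 * 2 ^ K := by
        rw [show K + 2 - 1 = K + 1 from rfl, pow_succ]; ring
      have p2 : (2 : Nat) ^ (K + 2) = 2 * (2 * 2 ^ K) := by
        rw [pow_succ, pow_succ]; ring
      omega

theorem pvBitsF_length_small (n : Nat) (h : n ≤ 1) : (pvBitsF n n).length = 1 := by
  interval_cases n <;> decide

theorem pvBin_length_eq_11_iff (m : Int) :
    (pvBin m).length = 11 ↔ (256 ≤ m ∧ m ≤ 511) ∨ (-255 ≤ m ∧ m ≤ -128) := by
  unfold pvBin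
  by_cases h : m < 0
  · rw [if_pos h]
    simp only [List.length_cons]
    set n := (-m).toNat with hn
    have hm : m = -(n : Int) := by omega
    constructor
    · intro hlen
      have h8 : (pvBitsF n n).length = 8 := by omega
      by_cases h1 : 1 ≤ n
      · have := pvBitsF_length_bounds n n le_rfl h1
        rw [h8] at this
        norm_num at this
        omega
      · have := pvBitsF_length_small n (by omega)
        omega
    · intro hr
      have h1 : 128 ≤ n ∧ n ≤ 255 := by omega
      have hb := pvBitsF_length_bounds n n le_rfl (by omega)
      set L := (pvBitsF n n).length with hL
      have hpos := pvBitsF_length_pos n n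
      -- pin L = 8 from 2^(L-1) ≤ n < 2^L and 128 ≤ n ≤ 255
      have hLle : L ≤ 8 := by
        by_contra hc
        have : 2 ^ 8 ≤ 2 ^ (L - 1) := Nat.pow_le_pow_right (by norm_num) (by omega)
        norm_num at this
        omega
      have hLge : 8 ≤ L := by
        by_contra hc
        have : 2 ^ L ≤ 2 ^ 7 := Nat.pow_le_pow_right (by norm_num) (by omega)
        norm_num at this
        omega
      omega
  · rw [if_neg h]
    simp only [List.length_cons]
    set n := m.toNat with hn
    have hm : m = (n : Int) := by omega
    constructor
    · intro hlen
      have h9 : (pvBitsF n n).length = 9 := by omega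
      by_cases h1 : 1 ≤ n
      · have := pvBitsF_length_bounds n n le_rfl h1
        rw [h9] at this
        norm_num at this
        omega
      · have := pvBitsF_length_small n (by omega)
        omega
    · intro hr
      have h1 : 256 ≤ n ∧ n ≤ 511 := by omega
      have hb := pvBitsF_length_bounds n n le_rfl (by omega)
      set L := (pvBitsF n n).length with hL
      have hpos := pvBitsF_length_pos n n
      have hLle : L ≤ 9 := by
        by_contra hc
        have : 2 ^ 9 ≤ 2 ^ (L - 1) := Nat.pow_le_pow_right (by norm_num) (by omega)
        norm_num at this
        omega
      have hLge : 9 ≤ L := by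
        by_contra hc
        have : 2 ^ L ≤ 2 ^ 8 := Nat.pow_le_pow_right (by norm_num) (by omega)
        norm_num at this
        omega
      omega

theorem math_2_of_len_ne_11 (file : Int) (h : (pvBin (2 * file)).length ≠ 11) :
    math_2 file = String.ofList (pvBin (2 * file)) := by
  unfold math_2
  simp only [pvParseBin_pvBin]
  rw [show file + file = 2 * file by ring, if_neg h]
  simp

-- ===== VERDICT (by name: the statement is the Claim_ definition above) =====
theorem math_2_spec : Claim_unchanged_math_2 := by
  intro file _ hnD
  by_cases hr : 128 ≤ file ∧ file ≤ 255
  · obtain ⟨h1, h2⟩ := hr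
    interval_cases file <;> decide
  · have hlen : (pvBin (2 * file)).length ≠ 11 := by
      rw [Ne, pvBin_length_eq_11_iff]
      unfold D_math_2 at hnD
      omega
    rw [math_2_of_len_ne_11 file hlen]
    unfold math_2_alt
    rw [if_neg hr]

theorem math_2_changed : Claim_changed_math_2 := by unfold Claim_changed_math_2; decide

theorem math_2_tight : Claim_exact_math_2 := by
  intro file _ hD
  obtain ⟨h1, h2⟩ := hD
  interval_cases file <;> decide
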